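-- pv_equiv track=rewrite | github.com/gbibbo/opro | src/qsm/vad/webrtc.py | _apply_hysteresis
-- ===== SOURCE A (Python) =====
-- def _apply_hysteresis(decisions: list[bool], n_frames: int) -> list[bool]:
--     """
--     Apply hysteresis smoothing: require n consecutive frames to change state.
--
--     Args:
--         decisions: Raw frame decisions
--         n_frames: Number of consecutive frames required
--
--     Returns:
--         Smoothed decisions
--     """
--     if n_frames <= 0:
--         return decisions
--
--     smoothed = []
--     current_state = decisions[0] if decisions else False
--     consecutive_count = 0
--
--     for decision in decisions:
--         if decision == current_state:
--             consecutive_count = 0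
--         else:
--             consecutive_count += 1
--             if consecutive_count >= n_frames:
--                 current_state = decision
--                 consecutive_count = 0
--
--         smoothed.append(current_state)
--
--     return smoothed
-- ===== SOURCE B (Python) =====
-- from itertools import groupby
--
-- def _apply_hysteresis(decisions: list[bool], n_frames: int) -> list[bool]:
--     """Run-based hysteresis: collapse input into runs, emit each run in bulk."""
--     if n_frames <= 0:
--         return decisions
--     out = []
--     state = decisions[0] if decisions else False
--     for value, grp in groupby(decisions):
--         length = sum(1 for _ in grp)
--         if value == state:
--             out.extend([state] * length)
--         else:
--             out.extend([state] * min(length, n_frames - 1))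
--             if length >= n_frames:
--                 out.extend([value] * (length - (n_frames - 1)))
--                 state = value
--     return out
-- ===== Notes on version B (the rewrite author's own statement) =====
-- stated objective: alternative
-- what changed: Replaces the per-frame loop with a counter by a run-length decomposition (itertools.groupby): each maximal run of equal values is emitted in one bulk step via a min/threshold formula, the counter disappears.
import Mathlib
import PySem

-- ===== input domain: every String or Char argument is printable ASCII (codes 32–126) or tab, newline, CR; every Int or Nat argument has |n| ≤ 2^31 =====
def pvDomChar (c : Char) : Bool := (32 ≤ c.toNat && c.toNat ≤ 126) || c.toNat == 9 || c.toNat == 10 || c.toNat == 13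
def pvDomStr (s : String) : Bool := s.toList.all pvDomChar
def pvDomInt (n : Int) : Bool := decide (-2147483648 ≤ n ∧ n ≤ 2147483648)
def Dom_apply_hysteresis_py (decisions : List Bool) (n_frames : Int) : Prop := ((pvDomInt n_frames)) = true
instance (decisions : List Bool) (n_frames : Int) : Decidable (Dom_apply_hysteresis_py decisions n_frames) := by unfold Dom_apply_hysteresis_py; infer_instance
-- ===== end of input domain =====

-- B replaces A's per-frame loop with a counter by a run-length (groupby) decomposition emitting each run in bulk; objective: alternative decomposition, same cost.

-- ===== PORT A =====
-- A's for-loop over frames, state (current_state, consecutive_count), as structural recursion.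
def pvLoopA (n : Int) (cs : Bool) (cc : Int) : List Bool → List Bool
  | [] => []
  | d :: ds =>
    if d = cs then cs :: pvLoopA n cs 0 ds
    else if cc + 1 ≥ n then d :: pvLoopA n d 0 ds
    else cs :: pvLoopA n cs (cc + 1) ds

def apply_hysteresis_py (decisions : List Bool) (n_frames : Int) : List Bool :=
  if n_frames ≤ 0 then decisions
  else pvLoopA n_frames (decisions.headD false) 0 decisions

-- ===== PORT B =====
-- itertools.groupby: collapse the list into maximal runs (value, length).
def pvRunsAux (v : Bool) (k : Nat) : List Bool → List (Bool × Nat)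
  | [] => [(v, k)]
  | x :: xs => if x = v then pvRunsAux v (k + 1) xs else (v, k) :: pvRunsAux x 1 xs

def pvRuns : List Bool → List (Bool × Nat)
  | [] => []
  | x :: xs => pvRunsAux x 1 xs

-- B's for-loop over the runs, emitting each run in bulk.
def pvLoopB (n : Int) (st : Bool) : List (Bool × Nat) → List Bool
  | [] => []
  | (v, len) :: rs =>
    if v = st then List.replicate len st ++ pvLoopB n st rs
    else if (len : Int) ≥ n then
      List.replicate (min len (n - 1).toNat) st ++
        (List.replicate (len - (n - 1).toNat) v ++ pvLoopB n v rs)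
    else
      List.replicate (min len (n - 1).toNat) st ++ pvLoopB n st rs

def apply_hysteresis_py_alt (decisions : List Bool) (n_frames : Int) : List Bool :=
  if n_frames ≤ 0 then decisions
  else pvLoopB n_frames (decisions.headD false) (pvRuns decisions)

-- ===== PRECONDITION & SPEC =====
def Spec_apply_hysteresis_py (decisions : List Bool) (n_frames : Int) (out : List Bool) : Prop := out = apply_hysteresis_py_alt decisions n_frames
instance (decisions : List Bool) (n_frames : Int) (out : List Bool) : Decidable (Spec_apply_hysteresis_py decisions n_frames out) := by unfold Spec_apply_hysteresis_py; infer_instance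

-- ===== CLAIM (what is proved, stated in full; the proofs are below) =====
def Claim_equal_apply_hysteresis_py : Prop := ∀ (decisions : List Bool) (n_frames : Int), Dom_apply_hysteresis_py decisions n_frames → Spec_apply_hysteresis_py decisions n_frames (apply_hysteresis_py decisions n_frames)

-- ===== LEMMAS AND PROOFS =====

def pvFlat (rs : List (Bool × Nat)) : List Bool := rs.flatMap (fun p => List.replicate p.2 p.1)

-- A's loop over a run matching the current state: counter resets, state unchanged.
theorem pvLoopA_match0 (n : Int) (cs : Bool) (k : Nat) (rest : List Bool) :
    pvLoopA n cs 0 (List.replicate k cs ++ rest) = List.replicate k cs ++ pvLoopA n cs 0 rest := by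
  induction k with
  | zero => simp
  | succ k ih => simp [List.replicate_succ, pvLoopA, ih]

theorem pvLoopA_match (n : Int) (cs : Bool) (cc : Int) (k : Nat) (rest : List Bool) :
    pvLoopA n cs cc (List.replicate (k + 1) cs ++ rest)
      = List.replicate (k + 1) cs ++ pvLoopA n cs 0 rest := by
  simp [List.replicate_succ, pvLoopA, pvLoopA_match0]

-- A differing run too short to flip: counter accumulates.
theorem pvLoopA_short (n : Int) (cs v : Bool) (hv : v ≠ cs) (k : Nat) :
    ∀ (cc : Int), cc + k < n → ∀ rest,
    pvLoopA n cs cc (List.replicate k v ++ rest)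
      = List.replicate k cs ++ pvLoopA n cs (cc + k) rest := by
  induction k with
  | zero => intro cc _ rest; simp
  | succ k ih =>
    intro cc h rest
    have h1 : ¬ (cc + 1 ≥ n) := by omega
    have := ih (cc + 1) (by push_cast at h ⊢; omega) rest
    simp only [List.replicate_succ, List.cons_append, pvLoopA, hv, h1, if_false]
    rw [this]
    have : cc + 1 + (k : Int) = cc + ((k : Nat) + 1 : Nat) := by push_cast; ring
    simp [this]

-- A differing run long enough to flip at the n-th differing frame.
theorem pvLoopA_long (n : Int) (cs v : Bool) (hv : v ≠ cs) (k : Nat) :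
    ∀ (cc : Int), 0 ≤ cc → cc < n → n ≤ cc + k → ∀ rest,
    pvLoopA n cs cc (List.replicate k v ++ rest)
      = List.replicate (n - cc - 1).toNat cs ++
        (List.replicate (k - (n - cc - 1).toNat) v ++ pvLoopA n v 0 rest) := by
  induction k with
  | zero => intro cc h0 h1 h2 rest; omega
  | succ k ih =>
    intro cc h0 h1 h2 rest
    by_cases hge : cc + 1 ≥ n
    · have hcc : cc = n - 1 := by omega
      have hz : (n - cc - 1).toNat = 0 := by omega
      simp only [List.replicate_succ, List.cons_append, pvLoopA, hv, hge, if_pos, hz]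
      rw [pvLoopA_match0]
      simp [List.replicate_succ]
    · have hrec := ih (cc + 1) (by omega) (by omega) (by push_cast at h2 ⊢; omega) rest
      have e1 : (n - cc - 1).toNat = (n - (cc + 1) - 1).toNat + 1 := by omega
      have e2 : k + 1 - (n - cc - 1).toNat = k - (n - (cc + 1) - 1).toNat := by omega
      simp only [List.replicate_succ, List.cons_append, pvLoopA, hv, hge, if_false]
      rw [hrec, e1]
      simp [List.replicate_succ, Nat.add_sub_add_right]

-- runsAux flattens back to the original list.
theorem pvRunsAux_flat (xs : List Bool) : ∀ (v : Bool) (k : Nat),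
    pvFlat (pvRunsAux v k xs) = List.replicate k v ++ xs := by
  induction xs with
  | nil => intro v k; simp [pvRunsAux, pvFlat]
  | cons x xs ih =>
    intro v k
    by_cases hx : x = v
    · subst hx
      simp only [pvRunsAux, if_true, ih]
      rw [List.replicate_succ' (n := k)]
      simp
    · simp only [pvRunsAux, if_neg hx, pvFlat, List.flatMap_cons]
      have := ih x 1
      simp [pvFlat] at this
      simp [this]

-- the first run produced by runsAux carries value v.
theorem pvRunsAux_head (xs : List Bool) : ∀ (v : Bool) (k : Nat),
    (pvRunsAux v k xs).head?.map Prod.fst = some v := by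
  induction xs with
  | nil => intro v k; simp [pvRunsAux]
  | cons x xs ih =>
    intro v k
    by_cases hx : x = v
    · subst hx; simp only [pvRunsAux, if_true]; exact ih x (k + 1)
    · simp [pvRunsAux, hx]

-- adjacent runs have different values.
theorem pvRunsAux_chain (xs : List Bool) : ∀ (v : Bool) (k : Nat),
    List.IsChain (fun p q : Bool × Nat => p.1 ≠ q.1) (pvRunsAux v k xs) := by
  induction xs with
  | nil => intro v k; simp [pvRunsAux]
  | cons x xs ih =>
    intro v k
    by_cases hx : x = v
    · subst hx; simp only [pvRunsAux, if_true]; exact ih x (k + 1)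
    · simp only [pvRunsAux, if_neg hx]
      have hhd := pvRunsAux_head xs x 1
      cases hr : pvRunsAux x 1 xs with
      | nil => simp
      | cons q qs =>
        rw [hr] at hhd
        have hq1 : q.1 = x := by simpa using hhd
        rw [List.isChain_cons_cons]
        refine ⟨?_, hr ▸ ih x 1⟩
        simp only [ne_eq, hq1]
        exact fun h => hx h.symm

-- run lengths are positive.
theorem pvRunsAux_pos (xs : List Bool) : ∀ (v : Bool) (k : Nat), 1 ≤ k →
    ∀ p ∈ pvRunsAux v k xs, 1 ≤ p.2 := by
  induction xs with
  | nil => intro v k hk p hp; simp [pvRunsAux] at hp; subst hp; exact hk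
  | cons x xs ih =>
    intro v k hk p hp
    by_cases hx : x = v
    · subst hx; simp only [pvRunsAux, if_true] at hp
      exact ih x (k + 1) (by omega) p hp
    · simp only [pvRunsAux, if_neg hx, List.mem_cons] at hp
      rcases hp with hp | hp
      · subst hp; exact hk
      · exact ih x 1 le_rfl p hp

theorem pvFlat_cons (v : Bool) (len : Nat) (rs : List (Bool × Nat)) :
    pvFlat ((v, len) :: rs) = List.replicate len v ++ pvFlat rs := by
  simp [pvFlat]

-- main correspondence: A's frame loop on the flattened runs equals B's run loop.
theorem pvMain (n : Int) (hn : 1 ≤ n) (rs : List (Bool × Nat))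
    (hchain : List.IsChain (fun p q : Bool × Nat => p.1 ≠ q.1) rs)
    (hpos : ∀ p ∈ rs, 1 ≤ p.2) :
    ∀ (cs : Bool) (cc : Int), 0 ≤ cc →
    (∀ p, rs.head? = some p → p.1 ≠ cs → cc = 0) →
    pvLoopA n cs cc (pvFlat rs) = pvLoopB n cs rs := by
  induction rs with
  | nil => intro cs cc _ _; simp [pvFlat, pvLoopA, pvLoopB]
  | cons p rs ih =>
    intro cs cc hcc hhead
    obtain ⟨v, len⟩ := p
    have hlen : 1 ≤ len := hpos (v, len) (List.mem_cons_self ..)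
    have hchain' : List.IsChain (fun p q : Bool × Nat => p.1 ≠ q.1) rs := hchain.tail
    have hpos' : ∀ p ∈ rs, 1 ≤ p.2 := fun p hp => hpos p (List.mem_cons_of_mem _ hp)
    rw [pvFlat_cons]
    by_cases hv : v = cs
    · subst hv
      obtain ⟨m, rfl⟩ : ∃ m, len = m + 1 := ⟨len - 1, by omega⟩
      rw [pvLoopA_match, ih hchain' hpos' v 0 le_rfl (fun _ _ _ => rfl)]
      simp [pvLoopB]
    · have hcc0 : cc = 0 := hhead (v, len) rfl hv
      subst hcc0
      by_cases hge : (len : Int) ≥ n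
      · have hmin : min len (n - 1).toNat = (n - 1).toNat := by omega
        rw [pvLoopA_long n cs v hv len 0 le_rfl (by omega) (by omega) (pvFlat rs)]
        rw [show ((n : Int) - 0 - 1) = n - 1 by ring]
        rw [ih hchain' hpos' v 0 le_rfl (fun _ _ _ => rfl)]
        simp [pvLoopB, hv, hge, hmin]
        all_goals omega
      · have hlt : (len : Int) < n := by omega
        have hmin : min len (n - 1).toNat = len := by omega
        rw [pvLoopA_short n cs v hv len 0 (by omega) (pvFlat rs)]
        have hnext : ∀ p, rs.head? = some p → p.1 ≠ cs → ((0 : Int) + (len : Nat)) = 0 := by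
          intro q hq hqcs
          exfalso
          cases rs with
          | nil => simp at hq
          | cons q' rs' =>
            have hq' : q' = q := by simpa using hq
            have hvq : v ≠ q'.1 := (List.isChain_cons_cons.mp hchain).1
            rw [hq'] at hvq
            revert hvq hqcs hv
            cases v <;> cases cs <;> cases q.1 <;> simp
        rw [ih hchain' hpos' cs ((0 : Int) + (len : Nat)) (by omega) hnext]
        simp [pvLoopB, hv, hge, hmin]
        all_goals omega

-- ===== VERDICT (by name: the statement is the Claim_ definition above) =====
theorem apply_hysteresis_py_spec : Claim_equal_apply_hysteresis_py := by
  intro decisions n _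
  unfold Spec_apply_hysteresis_py apply_hysteresis_py apply_hysteresis_py_alt
  by_cases hn : n ≤ 0
  · simp [hn]
  · simp only [if_neg hn]
    have hn1 : 1 ≤ n := by omega
    cases decisions with
    | nil => simp [pvRuns, pvLoopA, pvLoopB]
    | cons x xs =>
      have hflat : pvFlat (pvRuns (x :: xs)) = x :: xs := by
        have := pvRunsAux_flat xs x 1
        simp [pvRuns, this]
      have := pvMain n hn1 (pvRuns (x :: xs))
        (by simpa [pvRuns] using pvRunsAux_chain xs x 1)
        (by simpa [pvRuns] using pvRunsAux_pos xs x 1 le_rfl)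
        (List.headD (x :: xs) false) 0 le_rfl (fun _ _ _ => rfl)
      rw [← this, hflat]
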